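-- pv_equiv track=rewrite | github.com/JagDecoded/100DaysOfCode | CodeFights/Intro/005-shapeArea.py | shapeArea
-- ===== SOURCE A (Python) =====
-- def shapeArea(n):
--     total=0
--     for i in range(1,n+1):
--         if i <3:
--             total=total+i*i
--         else:
--             total=total+i*2+(i-2)*2
--     return total
-- ===== SOURCE B (Python) =====
-- def shapeArea(n):
--     # closed form of the size-n rhombus area; the empty range(1, n+1) sums to 0
--     return 2 * n * (n - 1) + 1 if n > 0 else 0
-- ===== Notes on version B (the rewrite author's own statement) =====
-- stated objective: faster
-- what changed: Replaced the O(n) summation loop with the closed-form formula 2*n*(n-1)+1 (0 for the empty range when n <= 0).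
import Mathlib
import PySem

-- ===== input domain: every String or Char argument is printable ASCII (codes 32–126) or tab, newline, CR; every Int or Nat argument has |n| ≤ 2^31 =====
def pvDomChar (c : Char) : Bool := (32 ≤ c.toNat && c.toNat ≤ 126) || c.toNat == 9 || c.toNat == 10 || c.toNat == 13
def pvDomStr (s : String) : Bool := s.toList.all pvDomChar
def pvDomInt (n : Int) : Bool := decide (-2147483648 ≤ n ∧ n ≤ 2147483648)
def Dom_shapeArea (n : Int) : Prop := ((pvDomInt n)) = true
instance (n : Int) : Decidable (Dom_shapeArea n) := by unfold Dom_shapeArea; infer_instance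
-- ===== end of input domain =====

-- B replaces A's O(n) summation loop with the closed-form formula 2*n*(n-1)+1 (0 when the range is empty).

-- ===== PORT A =====
def shapeArea (n : Int) : Int :=
  (PySem.List.pyRange 1 (n + 1) 1).foldl
    (fun total i => if i < 3 then total + i * i else total + i * 2 + (i - 2) * 2) 0

-- ===== PORT B =====
def shapeArea_alt (n : Int) : Int :=
  if 0 < n then 2 * n * (n - 1) + 1 else 0

-- ===== PRECONDITION & SPEC =====
def Spec_shapeArea (n : Int) (out : Int) : Prop := out = shapeArea_alt n
instance (n : Int) (out : Int) : Decidable (Spec_shapeArea n out) := by unfold Spec_shapeArea; infer_instance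

-- ===== CLAIM (what is proved, stated in full; the proofs are below) =====
def Claim_equal_shapeArea : Prop := ∀ (n : Int), Dom_shapeArea n → Spec_shapeArea n (shapeArea n)

-- ===== LEMMAS AND PROOFS =====

theorem shapeArea_nat (m : Nat) :
    shapeArea (m : Int) = if (0 : Int) < (m : Int) then 2 * (m : Int) * ((m : Int) - 1) + 1 else 0 := by
  induction m with
  | zero =>
    simp [shapeArea, PySem.List.pyRange_one_eq_nil]
  | succ k ih =>
    have h1 : (1 : Int) ≤ (k : Int) + 1 := by omega
    have hr : PySem.List.pyRange 1 ((k : Int) + 1 + 1) 1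
        = PySem.List.pyRange 1 ((k : Int) + 1) 1 ++ [(k : Int) + 1] :=
      PySem.List.pyRange_one_succ_right h1
    unfold shapeArea at ih ⊢
    push_cast
    rw [hr, List.foldl_append, ih]
    rcases Nat.lt_or_ge k 2 with hk | hk
    · interval_cases k <;> norm_num
    · have hk' : (2 : Int) ≤ (k : Int) := by exact_mod_cast hk
      have h3 : ¬ ((k : Int) + 1 < 3) := by omega
      have hp0 : (0 : Int) < (k : Int) := by omega
      have hp1 : (0 : Int) < (k : Int) + 1 := by omega
      simp only [List.foldl]
      rw [if_neg h3, if_pos hp0, if_pos hp1]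
      ring

theorem shapeArea_spec' (n : Int) : shapeArea n = shapeArea_alt n := by
  by_cases h : n ≤ 0
  · have hnil : PySem.List.pyRange 1 (n + 1) 1 = [] :=
      PySem.List.pyRange_one_eq_nil (by omega)
    simp [shapeArea, shapeArea_alt, hnil, not_lt.mpr h]
  · obtain ⟨m, rfl⟩ : ∃ m : Nat, n = (m : Int) := ⟨n.toNat, by omega⟩
    rw [shapeArea_nat m, shapeArea_alt]

-- ===== VERDICT (by name: the statement is the Claim_ definition above) =====
theorem shapeArea_spec : Claim_equal_shapeArea := by
  intro n _
  exact shapeArea_spec' n
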